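-- pv_equiv track=rewrite | github.com/dobyming/Algorithm | BOJ_Solve/23_AUG/AUG_Week3/2023-08-16/BOJ_17609_V.py | check
-- ===== SOURCE A (Python) =====
-- def check(arr,left,right):
--     while left < right:
--         if arr[left] == arr[right]:
--             left += 1
--             right -=1
--         else:
--             return False
--     return True
-- ===== SOURCE B (Python) =====
-- def check(arr, left, right):
--     s = arr[left:right + 1]
--     return s == s[::-1]
-- ===== Notes on version B (the rewrite author's own statement) =====
-- stated objective: idiomatic
-- what changed: Replaces the inward two-pointer loop with early exit by taking the inclusive subslice once and comparing it to its reversed copy.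
-- outside the precondition, e.g. on check(['a', 'b'], 3, 5): A raises IndexError, B returns True; on check(['a', 'b', 'c'], -1, 2): A returns False, B returns True; on check(['a', 'b', 'c'], 0, -2): A returns True, B returns False
import Mathlib
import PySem

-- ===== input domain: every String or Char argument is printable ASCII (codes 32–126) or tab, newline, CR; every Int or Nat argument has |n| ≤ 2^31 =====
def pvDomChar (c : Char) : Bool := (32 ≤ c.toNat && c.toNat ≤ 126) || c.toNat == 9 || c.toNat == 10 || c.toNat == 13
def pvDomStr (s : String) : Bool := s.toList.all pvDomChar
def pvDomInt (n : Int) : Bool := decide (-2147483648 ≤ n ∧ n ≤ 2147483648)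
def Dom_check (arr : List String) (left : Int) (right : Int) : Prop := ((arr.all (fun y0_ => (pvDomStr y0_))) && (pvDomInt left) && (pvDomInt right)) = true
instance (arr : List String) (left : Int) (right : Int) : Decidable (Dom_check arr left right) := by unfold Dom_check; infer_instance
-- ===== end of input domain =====

-- B replaces A's inward two-pointer loop by slicing the inclusive window once and comparing
-- it with its reversed copy (idiomatic; same asymptotic cost).


-- ===== PORT A =====
-- while left < right: compare arr[left] with arr[right] (Python indexing; pyGet? none = IndexError,
-- those inputs are excluded by Pre_check), move both pointers inward, early False on mismatch.
def check (arr : List String) (left : Int) (right : Int) : Bool :=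
  if _h : left < right then
    match PySem.List.pyGet? arr left, PySem.List.pyGet? arr right with
    | some a, some b => if a = b then check arr (left + 1) (right - 1) else false
    | _, _ => false   -- Python raises IndexError here; outside Pre_check
  else true
termination_by (right - left).toNat
decreasing_by omega

-- ===== PORT B =====
-- s = arr[left:right+1]; return s == s[::-1]   (s[::-1] is List.reverse, cf. PySem.List.slice?_none_none_neg_one)
def check_alt (arr : List String) (left : Int) (right : Int) : Bool :=
  let s := PySem.List.slice arr (some left) (some (right + 1))
  s == s.reverse

-- ===== PRECONDITION & SPEC =====
-- Pre_check admits the task's natural in-range windows (first disjunct) and the degenerate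
-- windows left ≥ right whose clamped slice keeps at most one element (second disjunct; there A
-- returns True without reading arr and a ≤1-element slice is trivially a palindrome). It excludes
-- inputs where A raises IndexError and inputs where A's value comes from Python's negative-index
-- wraparound, an artefact of direct indexing that the slice-based B does not reproduce.
def Pre_check (arr : List String) (left : Int) (right : Int) : Prop :=
  (0 ≤ left ∧ 0 ≤ right ∧ right < arr.length) ∨
  (right ≤ left ∧
    PySem.List.clampIdx arr.length (right + 1) ≤ PySem.List.clampIdx arr.length left + 1)
instance (arr : List String) (left : Int) (right : Int) : Decidable (Pre_check arr left right) := by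
  unfold Pre_check; infer_instance

def pvWitness_check : List String × Int × Int := (["ab", "x", "ab"], 0, 2)

def Spec_check (arr : List String) (left : Int) (right : Int) (out : Bool) : Prop := out = check_alt arr left right
instance (arr : List String) (left : Int) (right : Int) (out : Bool) : Decidable (Spec_check arr left right out) := by unfold Spec_check; infer_instance

-- ===== CLAIM (what is proved, stated in full; the proofs are below) =====
def Claim_equal_check : Prop := ∀ (arr : List String) (left : Int) (right : Int), Dom_check arr left right → Pre_check arr left right → Spec_check arr left right (check arr left right)

-- ===== LEMMAS AND PROOFS =====

-- a :: (xs ++ [b]) is its own reverse iff a = b and xs is its own reverse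
lemma pal_cons_concat (a b : String) (xs : List String) :
    ((a :: (xs ++ [b])) = (a :: (xs ++ [b])).reverse) ↔ (a = b ∧ xs = xs.reverse) := by
  simp only [List.reverse_cons, List.reverse_append, List.reverse_nil,
    List.nil_append, List.cons_append, List.cons.injEq]
  constructor
  · rintro ⟨rfl, h⟩
    exact ⟨rfl, by simpa [List.append_cancel_right_eq] using h⟩
  · rintro ⟨rfl, h⟩
    exact ⟨rfl, by rw [← h]⟩

-- Boolean form of pal_cons_concat, matching the ports' `==`
lemma pal_cons_concat_beq (a b : String) (xs : List String) :
    ((a :: (xs ++ [b])) == (a :: (xs ++ [b])).reverse) = (a == b && (xs == xs.reverse)) := by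
  rw [Bool.eq_iff_iff]
  simp only [Bool.and_eq_true, beq_iff_eq]
  exact pal_cons_concat a b xs

-- unfolds B's let-binding
lemma check_alt_eq (arr : List String) (l r : Int) :
    check_alt arr l r = (PySem.List.slice arr (some l) (some (r + 1))
      == (PySem.List.slice arr (some l) (some (r + 1))).reverse) := rfl

-- the inclusive window, in Nat form
lemma slice_window (arr : List String) (l r : ℕ) :
    PySem.List.slice arr (some (l : Int)) (some ((r : Int) + 1)) = (arr.drop l).take (r + 1 - l) := by
  have : ((r : Int) + 1) = ((r + 1 : ℕ) : Int) := by push_cast; ring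
  rw [this, PySem.List.slice_natCast]

-- the terminal case left ≥ right (window has at most one element)
lemma check_alt_of_ge (arr : List String) (l r : ℕ) (hr : r < arr.length) (h : r ≤ l) :
    check_alt arr (l : Int) (r : Int) = true := by
  rw [check_alt_eq, slice_window]
  rcases Nat.lt_or_ge r l with h' | h'
  · have : r + 1 - l = 0 := by omega
    simp [this]
  · have hl : l = r := by omega
    subst hl
    have h1 : l + 1 - l = 1 := by omega
    have hdrop : arr.drop l = arr[l] :: arr.drop (l + 1) := List.drop_eq_getElem_cons hr
    rw [h1, hdrop, List.take_succ_cons, List.take_zero]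
    simp

lemma check_eq_alt (k : ℕ) : ∀ (arr : List String) (l r : ℕ), r < arr.length → r - l ≤ k →
    check arr (l : Int) (r : Int) = check_alt arr (l : Int) (r : Int) := by
  induction k with
  | zero =>
    intro arr l r hr hk
    have hlr : ¬ ((l : Int) < (r : Int)) := by omega
    rw [check, dif_neg hlr, check_alt_of_ge arr l r hr (by omega)]
  | succ k ih =>
    intro arr l r hr hk
    by_cases hlr : (l : Int) < (r : Int)
    · have hlr' : l < r := by omega
      have hlL : l < arr.length := by omega
      rw [check, dif_pos hlr]
      have hgl : PySem.List.pyGet? arr (l : Int) = some arr[l] := by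
        simp [PySem.List.pyGet?, PySem.List.pyIdx?, hlL]
      have hgr : PySem.List.pyGet? arr (r : Int) = some arr[r] := by
        simp [PySem.List.pyGet?, PySem.List.pyIdx?, hr]
      rw [hgl, hgr]
      show (if arr[l] = arr[r] then check arr ((l : Int) + 1) ((r : Int) - 1) else false) = _
      -- decompose the window: arr[l] :: (inner ++ [arr[r]])
      have hwin : (arr.drop l).take (r + 1 - l)
          = arr[l] :: ((arr.drop (l + 1)).take (r - l - 1) ++ [arr[r]]) := by
        have hdrop : arr.drop l = arr[l] :: arr.drop (l + 1) := List.drop_eq_getElem_cons hlL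
        have h1 : r + 1 - l = (r - l - 1 + 1) + 1 := by omega
        rw [hdrop, h1, List.take_succ_cons, List.take_add_one]
        have : (arr.drop (l + 1))[r - l - 1]? = some arr[r] := by
          rw [List.getElem?_drop]
          have : l + 1 + (r - l - 1) = r := by omega
          rw [this, List.getElem?_eq_getElem hr]
        simp [this]
      have hrec : check arr ((l : Int) + 1) ((r : Int) - 1)
          = check_alt arr ((l : Int) + 1) ((r : Int) - 1) := by
        have e1 : (l : Int) + 1 = ((l + 1 : ℕ) : Int) := by push_cast; ring
        have e2 : (r : Int) - 1 = ((r - 1 : ℕ) : Int) := by omega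
        rw [e1, e2]
        exact ih arr (l + 1) (r - 1) (by omega) (by omega)
      by_cases heq : arr[l] = arr[r]
      · rw [if_pos heq, hrec]
        have e1 : (l : Int) + 1 = ((l + 1 : ℕ) : Int) := by push_cast; ring
        have e2 : (r : Int) - 1 + 1 = ((r - 1 : ℕ) : Int) + 1 := by omega
        rw [check_alt_eq, check_alt_eq, e2, e1, slice_window, slice_window]
        have h2 : r - 1 + 1 - (l + 1) = r - l - 1 := by omega
        rw [h2, hwin, pal_cons_concat_beq]
        simp [heq]
      · rw [if_neg heq, check_alt_eq, slice_window, hwin, pal_cons_concat_beq]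
        simp [heq]
    · rw [check, dif_neg hlr, check_alt_of_ge arr l r hr (by omega)]

-- degenerate window: the clamped slice keeps at most one element, so B returns true
lemma check_alt_trivial (arr : List String) (left right : Int)
    (h : PySem.List.clampIdx arr.length (right + 1) ≤ PySem.List.clampIdx arr.length left + 1) :
    check_alt arr left right = true := by
  rw [check_alt_eq]
  have hlen : (PySem.List.slice arr (some left) (some (right + 1))).length ≤ 1 := by
    rw [PySem.List.length_slice]; omega
  rcases hs : PySem.List.slice arr (some left) (some (right + 1)) with _ | ⟨x, _ | ⟨y, t⟩⟩
  · simp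
  · simp
  · rw [hs] at hlen; simp at hlen

-- ===== VERDICT (by name: the statement is the Claim_ definition above) =====
theorem check_spec : Claim_equal_check := by
  intro arr left right _hdom hpre
  unfold Spec_check
  rcases hpre with ⟨hl, hr, hrl⟩ | ⟨hge, hclamp⟩
  · obtain ⟨l, rfl⟩ := Int.eq_ofNat_of_zero_le hl
    obtain ⟨r, rfl⟩ := Int.eq_ofNat_of_zero_le hr
    exact check_eq_alt (r - l) arr l r (by exact_mod_cast hrl) le_rfl
  · rw [check, dif_neg (by omega), check_alt_trivial arr left right hclamp]
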